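-- pv_equiv track=rewrite | github.com/Pharallaxe/algorithms | ascii/spirale_ulam/spirale_ulam.py | spirale_ulam
-- ===== SOURCE A (Python) =====
-- def spirale_ulam(n):
--     grille = [[5, 4, 3], [6, 1, 2], [7, 8, 9]]
--     inc = 6
--     dernier = 9
--
--     while inc < n * 2:
--         b0 = grille[0]
--
--         # Traiter la ligne du bas.
--         if inc % 4 == 2:
--             grille = [grille[i] +
--                 [len(b0) - i + dernier]
--                 for i in range(0, len(grille))]
--             dernier += len(grille)
--
--         # Traiter la ligne du haut.
--         elif inc % 4 == 3:
--             grille.insert(0,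
--                 [int(dernier + i)
--                 for i in range(len(b0), 0, -1)])
--             dernier += len(b0)+1
--
--         # Traiter la ligne de gauche.
--         elif inc % 4 == 0:
--             grille = [
--                 [dernier + i] + grille[i]
--                 for i in range(0, len(grille))]
--             dernier += len(grille)
--
--         # Traiter la ligne de droite.
--         elif inc % 4 == 1:
--             grille.append(
--                 [dernier + i
--                 for i in range(0, len(b0))])
--             dernier += len(b0) - 1
--
--         inc += 1
--
--     return grille
-- ===== SOURCE B (Python) =====
-- def _ulam(r, c):
--     # Value of the spiral at centered coordinates (r down, c right), in closed form.
--     d = max(abs(r), abs(c))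
--     if d == 0:
--         return 1
--     s = (2 * d - 1) ** 2 + 1
--     if r == -d:                      # top side, right to left
--         return s + (2 * d - 1) + (d - c)
--     if r == d:                       # bottom side, left to right
--         return s + (2 * d - 1) + 4 * d + (c + d)
--     if c == d:                       # right side, bottom to top
--         return s + (d - 1 - r)
--     return s + (2 * d - 1) + 2 * d + (r + d)   # left side, top to bottom
--
-- def spirale_ulam(n):
--     # Replay only the growth counts to get the final dimensions and the center,
--     # then fill every cell with the closed-form spiral value.
--     rows, cols, top, left = 3, 3, 1, 1
--     k = 6
--     while k < 2 * n:
--         m = k % 4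
--         if m == 2:
--             cols += 1
--         elif m == 3:
--             rows += 1
--             top += 1
--         elif m == 0:
--             cols += 1
--             left += 1
--         else:
--             rows += 1
--         k += 1
--     return [[_ulam(r - top, c - left) for c in range(cols)] for r in range(rows)]
-- ===== Notes on version B (the rewrite author's own statement) =====
-- stated objective: faster
-- what changed: Instead of iteratively rebuilding the grid by appending a full row/column per loop step, B replays only the four growth counters to get the final dimensions and center, then fills every cell directly with a closed-form Ulam-spiral value from its centered coordinates.
import Mathlib
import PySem

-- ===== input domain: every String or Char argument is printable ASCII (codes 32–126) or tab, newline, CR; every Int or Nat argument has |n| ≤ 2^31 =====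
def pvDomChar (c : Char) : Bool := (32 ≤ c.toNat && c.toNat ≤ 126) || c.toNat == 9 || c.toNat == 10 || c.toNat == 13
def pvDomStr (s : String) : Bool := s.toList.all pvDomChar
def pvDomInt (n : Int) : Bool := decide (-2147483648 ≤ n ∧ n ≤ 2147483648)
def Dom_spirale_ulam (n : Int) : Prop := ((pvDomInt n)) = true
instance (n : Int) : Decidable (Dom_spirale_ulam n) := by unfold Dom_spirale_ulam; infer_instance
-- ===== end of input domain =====

-- B replaces A's repeated whole-grid rebuilding by a closed-form per-cell spiral value (measured asymptotically faster).

-- ===== PORT A =====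
-- the four list comprehensions of A's loop body, one helper each
def aRight (g : List (List Int)) (b0len dernier : Int) : List (List Int) :=
  (List.range g.length).map (fun (i : Nat) => (PySem.List.pyGet? g (i : Int)).getD [] ++ [b0len - (i : Int) + dernier])

def aTop (b0len dernier : Int) : List Int :=
  (PySem.List.pyRange b0len 0 (-1)).map (fun i => dernier + i)

def aLeft (g : List (List Int)) (dernier : Int) : List (List Int) :=
  (List.range g.length).map (fun (i : Nat) => [dernier + (i : Int)] ++ (PySem.List.pyGet? g (i : Int)).getD [])

def aBottom (b0len dernier : Int) : List Int :=
  (PySem.List.pyRange 0 b0len 1).map (fun i => dernier + i)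

-- the while loop; `grille[0]` is ported with pyGet?/getD (grille is never empty)
def aLoop (n : Int) (grille : List (List Int)) (inc dernier : Int) : List (List Int) :=
  if inc < n * 2 then
    let b0 : List Int := (PySem.List.pyGet? grille 0).getD []
    if PySem.Int.mod inc 4 = 2 then
      let g := aRight grille (b0.length : Int) dernier
      aLoop n g (inc + 1) (dernier + g.length)
    else if PySem.Int.mod inc 4 = 3 then
      aLoop n (aTop (b0.length : Int) dernier :: grille) (inc + 1) (dernier + (b0.length : Int) + 1)
    else if PySem.Int.mod inc 4 = 0 then
      let g := aLeft grille dernier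
      aLoop n g (inc + 1) (dernier + g.length)
    else if PySem.Int.mod inc 4 = 1 then
      aLoop n (grille ++ [aBottom (b0.length : Int) dernier]) (inc + 1) (dernier + (b0.length : Int) - 1)
    else
      aLoop n grille (inc + 1) dernier  -- unreachable: inc % 4 ∈ {0,1,2,3}
  else grille
termination_by (n * 2 - inc).toNat
decreasing_by all_goals omega

def spirale_ulam (n : Int) : List (List Int) :=
  aLoop n [[5, 4, 3], [6, 1, 2], [7, 8, 9]] 6 9

-- ===== PORT B =====
def ulamVal (r c : Int) : Int :=
  let d : Int := max |r| |c|
  if d = 0 then 1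
  else
    let s : Int := (2 * d - 1) ^ 2 + 1
    if r = -d then s + (2 * d - 1) + (d - c)
    else if r = d then s + (2 * d - 1) + 4 * d + (c + d)
    else if c = d then s + (d - 1 - r)
    else s + (2 * d - 1) + 2 * d + (r + d)

def bLoop (n rows cols top left k : Int) : Int × Int × Int × Int :=
  if k < 2 * n then
    let m := PySem.Int.mod k 4
    if m = 2 then bLoop n rows (cols + 1) top left (k + 1)
    else if m = 3 then bLoop n (rows + 1) cols (top + 1) left (k + 1)
    else if m = 0 then bLoop n rows (cols + 1) top (left + 1) (k + 1)
    else bLoop n (rows + 1) cols top left (k + 1)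
  else (rows, cols, top, left)
termination_by (2 * n - k).toNat
decreasing_by all_goals omega

def spirale_ulam_alt (n : Int) : List (List Int) :=
  let st := bLoop n 3 3 1 1 6
  (PySem.List.pyRange 0 st.1 1).map (fun r =>
    (PySem.List.pyRange 0 st.2.1 1).map (fun c => ulamVal (r - st.2.2.1) (c - st.2.2.2)))

-- ===== PRECONDITION & SPEC =====
def Spec_spirale_ulam (n : Int) (out : List (List Int)) : Prop := out = spirale_ulam_alt n
instance (n : Int) (out : List (List Int)) : Decidable (Spec_spirale_ulam n out) := by unfold Spec_spirale_ulam; infer_instance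

-- ===== CLAIM (what is proved, stated in full; the proofs are below) =====
def Claim_equal_spirale_ulam : Prop := ∀ (n : Int), Dom_spirale_ulam n → Spec_spirale_ulam n (spirale_ulam n)

-- ===== LEMMAS AND PROOFS =====

-- the rectangular spiral grid with U rows above the center, D below, L columns left, R right
def pvGrid (U D L R : Nat) : List (List Int) :=
  (List.range (U + D + 1)).map (fun (ri : Nat) =>
    (List.range (L + R + 1)).map (fun (ci : Nat) => ulamVal ((ri : Int) - U) ((ci : Int) - L)))

-- loop invariant: after (inc - 6) steps the state is one of four phase shapes
def pvInv (inc dernier : Int) (U D L R q : Nat) : Prop :=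
  (inc = 6 + 4 * q ∧ U = 1 + q ∧ D = 1 + q ∧ L = 1 + q ∧ R = 1 + q ∧
      dernier = (2 * (q : Int) + 3) ^ 2) ∨
  (inc = 6 + 4 * q + 1 ∧ U = 1 + q ∧ D = 1 + q ∧ L = 1 + q ∧ R = 2 + q ∧
      dernier = (2 * (q : Int) + 3) ^ 2 + 2 * q + 3) ∨
  (inc = 6 + 4 * q + 2 ∧ U = 2 + q ∧ D = 1 + q ∧ L = 1 + q ∧ R = 2 + q ∧
      dernier = (2 * (q : Int) + 3) ^ 2 + 4 * q + 8) ∨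
  (inc = 6 + 4 * q + 3 ∧ U = 2 + q ∧ D = 1 + q ∧ L = 2 + q ∧ R = 2 + q ∧
      dernier = (2 * (q : Int) + 3) ^ 2 + 6 * q + 12)

lemma ulam_right (d r : Int) (hd : 1 ≤ d) (h1 : -d ≤ r) (h2 : r ≤ d) :
    ulamVal r (d + 1) = (2 * d + 1) ^ 2 + d + 1 - r := by
  have hmax : max |r| |(d + 1 : Int)| = d + 1 := by
    rw [abs_of_nonneg (by omega : (0:Int) ≤ d + 1)]
    exact max_eq_right (le_trans (abs_le.mpr ⟨by omega, by omega⟩) (by omega))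
  simp only [ulamVal, hmax]
  rw [if_neg (by omega), if_neg (by omega), if_neg (by omega), ite_true]
  ring

lemma ulam_top (d c : Int) (hd : 1 ≤ d) (h1 : -d ≤ c) (h2 : c ≤ d + 1) :
    ulamVal (-(d + 1)) c = (2 * d + 1) ^ 2 + 3 * d + 3 - c := by
  have hmax : max |(-(d + 1) : Int)| |c| = d + 1 := by
    rw [abs_neg, abs_of_nonneg (by omega : (0:Int) ≤ d + 1)]
    exact max_eq_left (abs_le.mpr ⟨by omega, by omega⟩)
  simp only [ulamVal, hmax]
  rw [if_neg (by omega), ite_true]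
  ring

lemma ulam_left (d r : Int) (hd : 1 ≤ d) (h1 : -(d + 1) ≤ r) (h2 : r ≤ d) :
    ulamVal r (-(d + 1)) = (2 * d + 1) ^ 2 + 5 * d + 5 + r := by
  have hmax : max |r| |(-(d + 1) : Int)| = d + 1 := by
    rw [abs_neg, abs_of_nonneg (by omega : (0:Int) ≤ d + 1)]
    exact max_eq_right (abs_le.mpr ⟨by omega, by omega⟩)
  by_cases hr : r = -(d + 1)
  · simp only [ulamVal, hmax]
    rw [if_neg (by omega), if_pos (by omega), hr]
    ring
  · simp only [ulamVal, hmax]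
    rw [if_neg (by omega), if_neg (by omega), if_neg (by omega), if_neg (by omega)]
    ring

lemma ulam_bottom (d c : Int) (hd : 1 ≤ d) (h1 : -(d + 1) ≤ c) (h2 : c ≤ d + 1) :
    ulamVal (d + 1) c = (2 * d + 1) ^ 2 + 7 * d + 7 + c := by
  have hmax : max |(d + 1 : Int)| |c| = d + 1 := by
    rw [abs_of_nonneg (by omega : (0:Int) ≤ d + 1)]
    exact max_eq_left (abs_le.mpr ⟨by omega, by omega⟩)
  simp only [ulamVal, hmax]
  rw [if_neg (by omega), if_neg (by omega), ite_true]
  ring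

lemma pvGrid_row0 (U D L R : Nat) :
    (PySem.List.pyGet? (pvGrid U D L R) 0).getD [] =
      (List.range (L + R + 1)).map (fun (ci : Nat) => ulamVal (-(U : Int)) ((ci : Int) - L)) := by
  rw [pvGrid, PySem.List.pyGet?_zero, List.getElem?_map, List.getElem?_range (by omega)]
  simp

lemma pvGrid_row0_length (U D L R : Nat) :
    ((PySem.List.pyGet? (pvGrid U D L R) 0).getD []).length = L + R + 1 := by
  rw [pvGrid_row0]; simp

lemma pvGrid_length (U D L R : Nat) : (pvGrid U D L R).length = U + D + 1 := by
  simp [pvGrid]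

lemma pvGrid_get (U D L R i : Nat) (hi : i < U + D + 1) :
    (PySem.List.pyGet? (pvGrid U D L R) (i : Int)).getD [] =
      (List.range (L + R + 1)).map (fun (ci : Nat) => ulamVal ((i : Int) - U) ((ci : Int) - L)) := by
  rw [PySem.List.pyGet?_natCast, pvGrid, List.getElem?_map, List.getElem?_range hi]
  rfl

lemma step_right (q : Nat) :
    aRight (pvGrid (1 + q) (1 + q) (1 + q) (1 + q)) (((1 + q) + (1 + q) + 1 : Nat) : Int)
        ((2 * (q : Int) + 3) ^ 2) = pvGrid (1 + q) (1 + q) (1 + q) (2 + q) := by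
  rw [aRight, pvGrid_length]
  conv_rhs => rw [pvGrid]
  apply List.map_congr_left
  intro i hi
  rw [List.mem_range] at hi
  rw [pvGrid_get _ _ _ _ _ hi]
  conv_rhs => rw [show (1 + q) + (2 + q) + 1 = ((1 + q) + (1 + q) + 1) + 1 from by omega,
    List.range_succ, List.map_append]
  congr 1
  simp only [List.map_cons, List.map_nil]
  congr 1
  rw [show ((((1+q)+(1+q)+1 : Nat) : Int) - ((1+q : Nat) : Int)) = ((q : Int) + 1) + 1 from by push_cast; ring]
  rw [ulam_right ((q:Int)+1) ((i:Int) - ((1+q : Nat):Int)) (by omega) (by push_cast; omega) (by push_cast; omega)]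
  push_cast
  ring

lemma step_top (q : Nat) :
    aTop (((1 + q) + (2 + q) + 1 : Nat) : Int) ((2 * (q : Int) + 3) ^ 2 + 2 * q + 3) ::
        pvGrid (1 + q) (1 + q) (1 + q) (2 + q) = pvGrid (2 + q) (1 + q) (1 + q) (2 + q) := by
  conv_rhs => rw [pvGrid, show (2 + q) + (1 + q) + 1 = ((1 + q) + (1 + q) + 1) + 1 from by omega,
    List.range_succ_eq_map (n := (1 + q) + (1 + q) + 1), List.map_cons, List.map_map]
  congr 1
  · rw [aTop, PySem.List.pyRange_neg_one, List.map_map]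
    rw [show ((((1 + q) + (2 + q) + 1 : Nat) : Int) - 0).toNat = (1 + q) + (2 + q) + 1 from by omega]
    apply List.map_congr_left
    intro ci hci
    rw [List.mem_range] at hci
    simp only [Function.comp]
    rw [show ((0 : Nat) : Int) - ((2 + q : Nat) : Int) = -(((q : Int) + 1) + 1) from by push_cast; ring]
    rw [ulam_top ((q : Int) + 1) ((ci : Int) - ((1 + q : Nat) : Int)) (by omega)
      (by push_cast; omega) (by push_cast; omega)]
    push_cast
    ring
  · conv_lhs => rw [pvGrid]
    apply List.map_congr_left
    intro ri _
    apply List.map_congr_left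
    intro ci _
    simp only [Nat.succ_eq_add_one]
    congr 1
    push_cast
    ring

lemma step_left (q : Nat) :
    aLeft (pvGrid (2 + q) (1 + q) (1 + q) (2 + q)) ((2 * (q : Int) + 3) ^ 2 + 4 * q + 8) =
      pvGrid (2 + q) (1 + q) (2 + q) (2 + q) := by
  rw [aLeft, pvGrid_length]
  conv_rhs => rw [pvGrid]
  apply List.map_congr_left
  intro i hi
  rw [List.mem_range] at hi
  rw [pvGrid_get _ _ _ _ _ hi]
  conv_rhs => rw [show (2 + q) + (2 + q) + 1 = ((1 + q) + (2 + q) + 1) + 1 from by omega,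
    List.range_succ_eq_map (n := (1 + q) + (2 + q) + 1), List.map_cons, List.map_map]
  rw [List.singleton_append]
  congr 1
  · rw [show ((0 : Nat) : Int) - ((2 + q : Nat) : Int) = -(((q : Int) + 1) + 1) from by push_cast; ring]
    rw [ulam_left ((q : Int) + 1) ((i : Int) - ((2 + q : Nat) : Int)) (by omega)
      (by push_cast; omega) (by push_cast; omega)]
    push_cast
    ring
  · apply List.map_congr_left
    intro ci _
    congr 1
    push_cast
    ring

lemma pvGrid_snoc (U D L R : Nat) :
    pvGrid U (D + 1) L R = pvGrid U D L R ++
      [(List.range (L + R + 1)).map (fun (ci : Nat) =>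
        ulamVal (((U + D + 1 : Nat) : Int) - U) ((ci : Int) - L))] := by
  rw [pvGrid, show U + (D + 1) + 1 = (U + D + 1) + 1 from by omega,
    List.range_succ (n := U + D + 1), List.map_append]
  rfl

lemma step_bottom (q : Nat) :
    pvGrid (2 + q) (1 + q) (2 + q) (2 + q) ++
        [aBottom (((2 + q) + (2 + q) + 1 : Nat) : Int) ((2 * (q : Int) + 3) ^ 2 + 6 * q + 12)] =
      pvGrid (2 + q) (2 + q) (2 + q) (2 + q) := by
  rw [show pvGrid (2 + q) (2 + q) (2 + q) (2 + q) = pvGrid (2 + q) ((1 + q) + 1) (2 + q) (2 + q)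
    from by rw [show (2 : Nat) + q = 1 + q + 1 from by omega], pvGrid_snoc]
  congr 1
  congr 1
  rw [aBottom, PySem.List.pyRange_zero_natCast ((2 + q) + (2 + q) + 1), List.map_map]
  apply List.map_congr_left
  intro ci hci
  rw [List.mem_range] at hci
  simp only [Function.comp]
  rw [show (((2 + q) + (1 + q) + 1 : Nat) : Int) - ((2 + q : Nat) : Int) = ((q : Int) + 1) + 1 from by push_cast; ring]
  rw [ulam_bottom ((q : Int) + 1) ((ci : Int) - ((2 + q : Nat) : Int)) (by omega)
    (by push_cast; omega) (by push_cast; omega)]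
  push_cast
  ring

lemma render_pvGrid (U D L R : Nat) (rows cols top left : Int)
    (hr : rows = ((U + D + 1 : Nat) : Int)) (hc : cols = ((L + R + 1 : Nat) : Int))
    (ht : top = (U : Int)) (hl : left = (L : Int)) :
    (PySem.List.pyRange 0 rows 1).map (fun r =>
        (PySem.List.pyRange 0 cols 1).map (fun c => ulamVal (r - top) (c - left))) =
      pvGrid U D L R := by
  subst hr hc ht hl
  rw [PySem.List.pyRange_zero_natCast (U + D + 1), PySem.List.pyRange_zero_natCast (L + R + 1),
    List.map_map, pvGrid]
  apply List.map_congr_left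
  intro ri _
  simp only [Function.comp, List.map_map]
  rfl

lemma aRight_length (g : List (List Int)) (b d : Int) : (aRight g b d).length = g.length := by
  simp [aRight]

lemma aLeft_length (g : List (List Int)) (d : Int) : (aLeft g d).length = g.length := by
  simp [aLeft]

lemma pv_main (fuel : Nat) : ∀ (n inc dernier : Int) (U D L R q : Nat),
    pvInv inc dernier U D L R q → (n * 2 - inc).toNat ≤ fuel →
    aLoop n (pvGrid U D L R) inc dernier =
      (let st := bLoop n ((U + D + 1 : Nat) : Int) ((L + R + 1 : Nat) : Int) (U : Int) (L : Int) inc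
       (PySem.List.pyRange 0 st.1 1).map (fun r =>
         (PySem.List.pyRange 0 st.2.1 1).map (fun c => ulamVal (r - st.2.2.1) (c - st.2.2.2)))) := by
  induction fuel with
  | zero =>
    intro n inc dernier U D L R q hInv hf
    have hge : ¬ inc < n * 2 := by omega
    rw [aLoop, bLoop, if_neg hge, if_neg (show ¬ inc < 2 * n by omega)]
    exact (render_pvGrid U D L R _ _ _ _ rfl rfl rfl rfl).symm
  | succ f ih =>
    intro n inc dernier U D L R q hInv hf
    by_cases hlt : inc < n * 2
    case neg =>
      rw [aLoop, bLoop, if_neg hlt, if_neg (show ¬ inc < 2 * n by omega)]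
      exact (render_pvGrid U D L R _ _ _ _ rfl rfl rfl rfl).symm
    case pos =>
    rcases hInv with ⟨h1, h2, h3, h4, h5, h6⟩ | ⟨h1, h2, h3, h4, h5, h6⟩ |
      ⟨h1, h2, h3, h4, h5, h6⟩ | ⟨h1, h2, h3, h4, h5, h6⟩ <;>
      subst h1 h2 h3 h4 h5 h6
    · -- phase 0: inc % 4 = 2, add the right column
      have hm : PySem.Int.mod (6 + 4 * (q : Int)) 4 = 2 := by
        rw [PySem.Int.mod_eq_emod_of_pos (by norm_num)]; omega
      rw [aLoop, bLoop, if_pos hlt, if_pos (show 6 + 4 * (q : Int) < 2 * n by omega)]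
      simp only [hm, reduceIte]
      rw [pvGrid_row0_length, aRight_length, pvGrid_length, step_right q]
      have e1 : ((2 * (q : Int) + 3) ^ 2 + ((1 + q) + (1 + q) + 1 : Nat)) =
          (2 * (q : Int) + 3) ^ 2 + 2 * q + 3 := by push_cast; ring
      have e2 : (((1 + q) + (1 + q) + 1 : Nat) : Int) + 1 = (((1 + q) + (2 + q) + 1 : Nat) : Int) := by
        push_cast; ring
      rw [e1, e2]
      exact ih n _ _ _ _ _ _ q (Or.inr (Or.inl ⟨by omega, rfl, rfl, rfl, rfl, rfl⟩)) (by omega)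
    · -- phase 1: inc % 4 = 3, add the top row
      have hm : PySem.Int.mod (6 + 4 * (q : Int) + 1) 4 = 3 := by
        rw [PySem.Int.mod_eq_emod_of_pos (by norm_num)]; omega
      rw [aLoop, bLoop, if_pos hlt, if_pos (show 6 + 4 * (q : Int) + 1 < 2 * n by omega)]
      simp only [hm, reduceIte]
      rw [pvGrid_row0_length, step_top q]
      have e1 : ((2 * (q : Int) + 3) ^ 2 + 2 * q + 3 + ((1 + q) + (2 + q) + 1 : Nat) + 1) =
          (2 * (q : Int) + 3) ^ 2 + 4 * q + 8 := by push_cast; ring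
      have e2 : (((1 + q) + (1 + q) + 1 : Nat) : Int) + 1 = (((2 + q) + (1 + q) + 1 : Nat) : Int) := by
        push_cast; ring
      have e3 : ((1 + q : Nat) : Int) + 1 = ((2 + q : Nat) : Int) := by push_cast; ring
      rw [e1, e2, e3]
      exact ih n _ _ _ _ _ _ q (Or.inr (Or.inr (Or.inl ⟨by omega, rfl, rfl, rfl, rfl, rfl⟩)))
        (by omega)
    · -- phase 2: inc % 4 = 0, add the left column
      have hm : PySem.Int.mod (6 + 4 * (q : Int) + 2) 4 = 0 := by
        rw [PySem.Int.mod_eq_emod_of_pos (by norm_num)]; omega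
      rw [aLoop, bLoop, if_pos hlt, if_pos (show 6 + 4 * (q : Int) + 2 < 2 * n by omega)]
      simp only [hm, reduceIte]
      rw [aLeft_length, pvGrid_length, step_left q]
      have e1 : ((2 * (q : Int) + 3) ^ 2 + 4 * q + 8 + ((2 + q) + (1 + q) + 1 : Nat)) =
          (2 * (q : Int) + 3) ^ 2 + 6 * q + 12 := by push_cast; ring
      have e2 : (((1 + q) + (2 + q) + 1 : Nat) : Int) + 1 = (((2 + q) + (2 + q) + 1 : Nat) : Int) := by
        push_cast; ring
      have e3 : ((1 + q : Nat) : Int) + 1 = ((2 + q : Nat) : Int) := by push_cast; ring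
      rw [e1, e2, e3]
      exact ih n _ _ _ _ _ _ q (Or.inr (Or.inr (Or.inr ⟨by omega, rfl, rfl, rfl, rfl, rfl⟩)))
        (by omega)
    · -- phase 3: inc % 4 = 1, add the bottom row
      have hm : PySem.Int.mod (6 + 4 * (q : Int) + 3) 4 = 1 := by
        rw [PySem.Int.mod_eq_emod_of_pos (by norm_num)]; omega
      rw [aLoop, bLoop, if_pos hlt, if_pos (show 6 + 4 * (q : Int) + 3 < 2 * n by omega)]
      simp only [hm, reduceIte]
      rw [pvGrid_row0_length, step_bottom q]
      have e1 : ((2 * (q : Int) + 3) ^ 2 + 6 * q + 12 + ((2 + q) + (2 + q) + 1 : Nat) - 1) =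
          (2 * ((q : Int) + 1) + 3) ^ 2 := by push_cast; ring
      have e2 : (((2 + q) + (1 + q) + 1 : Nat) : Int) + 1 = (((2 + q) + (2 + q) + 1 : Nat) : Int) := by
        push_cast; ring
      rw [e1, e2]
      have hinv : pvInv (6 + 4 * (q : Int) + 3 + 1) ((2 * ((q : Int) + 1) + 3) ^ 2)
          (2 + q) (2 + q) (2 + q) (2 + q) (q + 1) := by
        left
        refine ⟨by push_cast; ring, by omega, by omega, by omega, by omega, by push_cast; ring⟩
      exact ih n _ _ _ _ _ _ (q + 1) hinv (by omega)

lemma pvGrid_init : pvGrid 1 1 1 1 = [[5, 4, 3], [6, 1, 2], [7, 8, 9]] := by decide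

-- ===== VERDICT (by name: the statement is the Claim_ definition above) =====
theorem spirale_ulam_spec : Claim_equal_spirale_ulam := by
  intro n _
  unfold Spec_spirale_ulam spirale_ulam spirale_ulam_alt
  rw [← pvGrid_init]
  have h := pv_main (n * 2 - 6).toNat n 6 9 1 1 1 1 0
    (Or.inl ⟨by norm_num, rfl, rfl, rfl, rfl, by norm_num⟩) (by omega)
  simpa using h
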